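-- pv_equiv track=rewrite | github.com/finos/morphir | substrate/examples/fr2052a-lcr/structured/scripts/extract_iic.py | _split_pid_product
-- ===== SOURCE A (Python) =====
-- def _split_pid_product(chars) -> str:
--     """Insert a single space between the PID prefix (italic) and the product
--     name (regular)."""
--     out: list[str] = []
--     prev_italic = None
--     for c in chars:
--         is_italic = "Italic" in c["fontname"]
--         if prev_italic is True and is_italic is False and out and out[-1] != " ":
--             out.append(" ")
--         out.append(c["text"])
--         prev_italic = is_italic
--     return "".join(out).strip()
-- ===== SOURCE B (Python) =====
-- def _split_pid_product(chars) -> str: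
--     """Insert a single space between the PID prefix (italic) and the product
--     name (regular) -- run-based: split into maximal italic/regular runs and
--     insert the space at each italic->regular boundary."""
--     items = [(c["text"], "Italic" in c["fontname"]) for c in chars]
--     return "".join(_emit(_runs(items))).strip()
--
--
-- def _runs(items):
--     """Maximal runs of equal italic flag, as (flag, [texts])."""
--     runs = []
--     i = 0
--     n = len(items)
--     while i < n:
--         flag = items[i][1]
--         j = i
--         while j < n and items[j][1] == flag:
--             j += 1
--         runs.append((flag, [t for t, _ in items[i:j]]))
--         i = j
--     return runs
--
--
-- def _emit(runs):
--     out = []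
--     for i, (flag, texts) in enumerate(runs):
--         out += texts
--         if flag and i + 1 < len(runs) and texts[-1] != " ":
--             out.append(" ")
--     return out
-- ===== Notes on version B (the rewrite author's own statement) =====
-- stated objective: alternative
-- what changed: B first groups the chars into maximal italic/regular runs and inserts the space at each italic-to-regular run boundary (unless the run's last text element is a single space), instead of A's per-char loop carrying a prev_italic flag and inspecting out[-1].
import Mathlib
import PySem

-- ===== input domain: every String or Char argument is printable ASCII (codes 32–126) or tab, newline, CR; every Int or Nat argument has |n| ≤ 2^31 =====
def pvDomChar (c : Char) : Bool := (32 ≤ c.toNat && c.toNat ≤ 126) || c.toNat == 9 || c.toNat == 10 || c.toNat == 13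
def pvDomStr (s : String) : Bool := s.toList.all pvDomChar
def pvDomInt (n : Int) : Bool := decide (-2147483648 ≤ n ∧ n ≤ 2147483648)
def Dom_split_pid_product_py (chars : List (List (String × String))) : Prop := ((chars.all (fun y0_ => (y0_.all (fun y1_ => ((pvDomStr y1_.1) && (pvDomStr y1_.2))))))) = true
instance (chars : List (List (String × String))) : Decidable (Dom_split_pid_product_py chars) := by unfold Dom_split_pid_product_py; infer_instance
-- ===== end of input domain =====

-- B re-implements the space insertion over maximal italic/regular runs instead of a per-char prev-flag loop (objective: alternative decomposition, same cost).

-- ===== PORT A =====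
-- c["<k>"] under Pre_ (key present); the dict is the assoc list, first-match lookup
def pvField (c : List (String × String)) (k : String) : String :=
  ((PySem.Dict.mk c).get? k).getD ""

def pvStepA (st : List String × Option Bool) (c : List (String × String)) :
    List String × Option Bool :=
  let isItalic := PySem.Str.isIn "Italic" (pvField c "fontname")
  let out :=
    if st.2 = some true ∧ isItalic = false ∧ st.1 ≠ [] ∧ st.1.getLast? ≠ some " "
    then st.1 ++ [" "] else st.1
  (out ++ [pvField c "text"], some isItalic)

def split_pid_product_py (chars : List (List (String × String))) : String :=
  PySem.Str.strip (PySem.Str.join "" ((chars.foldl pvStepA ([], none)).1))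

-- ===== PORT B =====
-- the inner while loop of _runs: texts of the run with this flag, and the rest
def pvTakeRun (flag : Bool) : List (String × Bool) → List String × List (String × Bool)
  | [] => ([], [])
  | (t, b) :: rest =>
      if b = flag then
        let p := pvTakeRun flag rest
        (t :: p.1, p.2)
      else ([], (t, b) :: rest)

theorem pvTakeRun_len (flag : Bool) (l : List (String × Bool)) :
    (pvTakeRun flag l).2.length ≤ l.length := by
  induction l with
  | nil => simp [pvTakeRun]
  | cons h tl ih =>
      obtain ⟨t, b⟩ := h
      by_cases hb : b = flag <;> simp [pvTakeRun, hb]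
      omega

def pvRuns : List (String × Bool) → List (Bool × List String)
  | [] => []
  | (t, b) :: rest =>
      (b, t :: (pvTakeRun b rest).1) :: pvRuns (pvTakeRun b rest).2
  termination_by l => l.length
  decreasing_by
    simp only [List.length_cons]
    exact Nat.lt_succ_of_le (pvTakeRun_len b rest)

def pvEmit : List (Bool × List String) → List String
  | [] => []
  | (flag, texts) :: rest =>
      texts ++
        (if flag = true ∧ rest ≠ [] ∧ texts.getLast? ≠ some " " then [" "] else []) ++
        pvEmit rest

def split_pid_product_py_alt (chars : List (List (String × String))) : String :=
  let items := chars.map (fun c =>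
    (pvField c "text", PySem.Str.isIn "Italic" (pvField c "fontname")))
  PySem.Str.strip (PySem.Str.join "" (pvEmit (pvRuns items)))

-- ===== PRECONDITION & SPEC =====
-- Python A raises KeyError when a char dict lacks "fontname" or "text"; Pre_ excludes exactly those inputs.
def Pre_split_pid_product_py (chars : List (List (String × String))) : Prop :=
  ∀ c ∈ chars, "fontname" ∈ c.map Prod.fst ∧ "text" ∈ c.map Prod.fst

instance (chars : List (List (String × String))) : Decidable (Pre_split_pid_product_py chars) := by
  unfold Pre_split_pid_product_py; infer_instance

def pvWitness_split_pid_product_py : (List (List (String × String))) :=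
  [[("fontname", "Helv-Italic"), ("text", "PID12")],
   [("fontname", "Helv"), ("text", "Product")]]

def Spec_split_pid_product_py (chars : List (List (String × String))) (out : String) : Prop := out = split_pid_product_py_alt chars
instance (chars : List (List (String × String))) (out : String) : Decidable (Spec_split_pid_product_py chars out) := by unfold Spec_split_pid_product_py; infer_instance

-- ===== CLAIM (what is proved, stated in full; the proofs are below) =====
def Claim_equal_split_pid_product_py : Prop := ∀ (chars : List (List (String × String))), Dom_split_pid_product_py chars → Pre_split_pid_product_py chars → Spec_split_pid_product_py chars (split_pid_product_py chars)

-- ===== LEMMAS AND PROOFS =====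

-- common abstraction: the output pieces as a function of the previous (flag, text)
def pvG : Option (Bool × String) → List (String × Bool) → List String
  | _, [] => []
  | prev, (t, b) :: rest =>
      (match prev with
       | some (pb, pt) => if pb = true ∧ b = false ∧ pt ≠ " " then [" "] else []
       | none => []) ++ t :: pvG (some (b, t)) rest

def pvItem (c : List (String × String)) : String × Bool :=
  (pvField c "text", PySem.Str.isIn "Italic" (pvField c "fontname"))

theorem pvFoldA_char (cs : List (List (String × String))) :
    ∀ (out : List String) (b : Bool) (t : String), out.getLast? = some t →
      (cs.foldl pvStepA (out, some b)).1 = out ++ pvG (some (b, t)) (cs.map pvItem) := by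
  induction cs with
  | nil => intro out b t _; simp [pvG]
  | cons c cs ih =>
      intro out b t hlast
      have hne : out ≠ [] := by
        intro h; rw [h] at hlast; simp at hlast
      rcases hq : pvItem c with ⟨t', b'⟩
  
      have h1 : pvField c "text" = t' := congrArg Prod.fst hq
      have h2 : PySem.Str.isIn "Italic" (pvField c "fontname") = b' := congrArg Prod.snd hq
      have hiff : (some b = some true ∧ b' = false ∧ out ≠ [] ∧ out.getLast? ≠ some " ")
          ↔ (b = true ∧ b' = false ∧ t ≠ " ") := by
        rw [hlast]
        constructor
        · rintro ⟨ha, hb, _, hd⟩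
          exact ⟨by simpa using ha, hb, fun h => hd (by rw [h])⟩
        · rintro ⟨ha, hb, hcz⟩
          exact ⟨by simp [ha], hb, hne, by simpa using hcz⟩
      have hstep : pvStepA (out, some b) c =
          ((if b = true ∧ b' = false ∧ t ≠ " " then out ++ [" "] else out) ++ [t'], some b') := by
        simp only [pvStepA, h1, h2]
        rw [if_congr hiff rfl rfl]
      simp only [List.foldl_cons, List.map_cons, hq, hstep]
      by_cases hc : b = true ∧ b' = false ∧ t ≠ " "
      · rw [if_pos hc, ih ((out ++ [" "]) ++ [t']) b' t' (by simp)]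
        obtain ⟨ha, hb, hcz⟩ := hc
        simp [pvG, ha, hb, hcz]
      · rw [if_neg hc, ih (out ++ [t']) b' t' (by simp)]
        have hG : pvG (some (b, t)) ((t', b') :: cs.map pvItem)
            = t' :: pvG (some (b', t')) (cs.map pvItem) := by
          simp only [pvG]
          rw [if_neg hc]
          simp
        rw [hG]
        simp

theorem pvFoldA_eq_pvG (chars : List (List (String × String))) :
    (chars.foldl pvStepA ([], none)).1 = pvG none (chars.map pvItem) := by
  cases chars with
  | nil => simp [pvG]
  | cons c cs =>
      simp only [List.foldl_cons, List.map_cons]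
      have hstep : pvStepA (([] : List String), none) c
          = ([pvField c "text"], some (PySem.Str.isIn "Italic" (pvField c "fontname"))) := by
        simp [pvStepA]
      rw [hstep, pvFoldA_char cs [pvField c "text"] _ (pvField c "text") (by simp)]
      simp [pvG, pvItem]

theorem pvRuns_eq_nil_iff (items : List (String × Bool)) : pvRuns items = [] ↔ items = [] := by
  cases items with
  | nil => simp [pvRuns]
  | cons h tl => obtain ⟨t, b⟩ := h; simp [pvRuns]

theorem pvEmit_aux : ∀ (n : ℕ) (items : List (String × Bool)), items.length ≤ n →
    ∀ (b : Bool) (t : String),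
      (pvTakeRun b items).1 ++
        (if b = true ∧ (pvTakeRun b items).2 ≠ [] ∧ (t :: (pvTakeRun b items).1).getLast? ≠ some " "
         then [" "] else []) ++
        pvEmit (pvRuns (pvTakeRun b items).2)
      = pvG (some (b, t)) items := by
  intro n
  induction n with
  | zero =>
      intro items h b t
      have : items = [] := List.length_eq_zero_iff.mp (Nat.le_zero.mp h)
      subst this
      simp [pvTakeRun, pvRuns, pvEmit, pvG]
  | succ n ih =>
      intro items h b t
      cases items with
      | nil => simp [pvTakeRun, pvRuns, pvEmit, pvG]
      | cons hd rest =>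
          obtain ⟨t', b'⟩ := hd
          have hrest : rest.length ≤ n := by simpa using h
          by_cases hb : b' = b
          · subst hb
            have htr : pvTakeRun b' ((t', b') :: rest)
                = (t' :: (pvTakeRun b' rest).1, (pvTakeRun b' rest).2) := by
              simp [pvTakeRun]
            rw [htr]
            have hlast : (t :: t' :: (pvTakeRun b' rest).1).getLast?
                = (t' :: (pvTakeRun b' rest).1).getLast? := List.getLast?_cons_cons ..
            simp only [hlast]
            have hnc : ¬ (b' = true ∧ b' = false ∧ t ≠ " ") := by
              rintro ⟨ha, hbf, -⟩
              rw [ha] at hbf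
              exact absurd hbf (by simp)
            have hG : pvG (some (b', t)) ((t', b') :: rest) = t' :: pvG (some (b', t')) rest := by
              simp only [pvG]
              rw [if_neg hnc]
              simp
            rw [hG, ← ih rest hrest b' t']
            simp
          · have htr : pvTakeRun b ((t', b') :: rest) = ([], (t', b') :: rest) := by
              simp [pvTakeRun, hb]
            rw [htr]
            have hruns : pvRuns ((t', b') :: rest)
                = (b', t' :: (pvTakeRun b' rest).1) :: pvRuns (pvTakeRun b' rest).2 := by
              simp [pvRuns]
            have hemit : pvEmit (pvRuns ((t', b') :: rest))
                = t' :: pvG (some (b', t')) rest := by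
              rw [hruns]
              simp only [pvEmit]
              rw [← ih rest hrest b' t']
              have : (pvRuns (pvTakeRun b' rest).2 ≠ []) ↔ ((pvTakeRun b' rest).2 ≠ []) := by
                simp [pvRuns_eq_nil_iff]
              simp [this]
            have hG : pvG (some (b, t)) ((t', b') :: rest)
                = (if b = true ∧ b' = false ∧ t ≠ " " then [" "] else [])
                  ++ t' :: pvG (some (b', t')) rest := by
              simp [pvG]
            rw [hG, ← hemit]
            have hcond : (b = true ∧ (t', b') :: rest ≠ [] ∧ ([t] : List String).getLast? ≠ some " ")
                ↔ (b = true ∧ b' = false ∧ t ≠ " ") := by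
              constructor
              · rintro ⟨h1, _, h3⟩
                refine ⟨h1, ?_, by simpa using h3⟩
                cases b' <;> simp_all
              · rintro ⟨h1, _, h3⟩
                exact ⟨h1, by simp, by simpa using h3⟩
            by_cases hc : b = true ∧ b' = false ∧ t ≠ " "
            · rw [if_pos (hcond.mpr hc), if_pos hc]; simp
            · rw [if_neg (fun h => hc (hcond.mp h)), if_neg hc]; simp

theorem pvEmit_runs (items : List (String × Bool)) :
    pvEmit (pvRuns items) = pvG none items := by
  cases items with
  | nil => simp [pvRuns, pvEmit, pvG]
  | cons hd rest =>
      obtain ⟨t, b⟩ := hd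
      have hruns : pvRuns ((t, b) :: rest)
          = (b, t :: (pvTakeRun b rest).1) :: pvRuns (pvTakeRun b rest).2 := by
        simp [pvRuns]
      rw [hruns]
      simp only [pvEmit, ne_eq, pvRuns_eq_nil_iff]
      have hG : pvG none ((t, b) :: rest) = t :: pvG (some (b, t)) rest := by simp [pvG]
      rw [hG, ← pvEmit_aux rest.length rest le_rfl b t]
      simp

-- ===== VERDICT (by name: the statement is the Claim_ definition above) =====
theorem split_pid_product_py_spec : Claim_equal_split_pid_product_py := by
  intro chars _ _
  unfold Spec_split_pid_product_py split_pid_product_py split_pid_product_py_alt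
  rw [pvFoldA_eq_pvG, ← pvEmit_runs]
  rfl
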